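-- pv_equiv track=rewrite | github.com/oysters76/aoc_2022 | ex5.py | parse_line
-- ===== SOURCE A (Python) =====
-- def fmt_line(line, n):
--     formatted_line = ""
--     counter = 0
--     for i,l in enumerate(line, n):
--         if (counter == n):
--             counter = 0
--             continue
--         formatted_line += l
--         counter += 1
--     return formatted_line
--
-- def parse_line(line, n):
--     line = fmt_line(line, n)
--     start = 0
--     end = n
--     limit = len(line)
--     line_data = ['#'] * n
--     index = 0
--
--     while end <= limit:
--         sub = line[start:end];
--         for c in sub:
--             if c != '[' and c != ']' and c != '' and c != ' ':
--                 line_data[index] = c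
--         index += 1
--         start = end
--         end += n
--
--     return line_data
-- ===== SOURCE B (Python) =====
-- def parse_line(line, n):
--     # One pass, no intermediate formatted string: the j-th kept character of
--     # fmt_line's output sits at original index j + j//n (one char is skipped
--     # after every n kept chars).  Group k is kept chars k*n .. (k+1)*n-1;
--     # only complete groups are scanned, last valid char wins.
--     line_data = ['#'] * n
--     kept = len(line) - len(line) // (n + 1)
--     for k in range(kept // n):
--         for j in range(k * n, (k + 1) * n):
--             c = line[j + j // n]
--             if c != '[' and c != ']' and c != ' ':
--                 line_data[k] = c
--     return line_data
-- ===== Notes on version B (the rewrite author's own statement) =====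
-- stated objective: alternative
-- what changed: B drops fmt_line's intermediate formatted string and the while/slice loop: a closed-form index map (the j-th kept char sits at line[j + j//n]) lets one pair of range loops read each complete group directly from the original line.
import Mathlib
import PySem

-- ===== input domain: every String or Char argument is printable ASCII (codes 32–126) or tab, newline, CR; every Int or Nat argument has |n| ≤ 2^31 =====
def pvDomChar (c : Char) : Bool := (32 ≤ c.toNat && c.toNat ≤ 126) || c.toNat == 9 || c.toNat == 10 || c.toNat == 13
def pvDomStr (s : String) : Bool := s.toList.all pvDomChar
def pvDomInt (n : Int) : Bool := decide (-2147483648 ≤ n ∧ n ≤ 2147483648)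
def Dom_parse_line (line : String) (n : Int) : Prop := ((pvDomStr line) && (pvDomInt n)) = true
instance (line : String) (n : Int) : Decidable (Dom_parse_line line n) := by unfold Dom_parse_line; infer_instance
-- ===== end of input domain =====

-- B replaces fmt_line's intermediate formatted string and the while/slice loop by one pair of
-- range loops reading each complete group directly from the original line via the closed-form
-- index map j ↦ j + j//n (alternative decomposition, same asymptotic cost).


-- ===== PORT A =====
-- fmt_line's loop: the enumerate index i is unused in Python (the start argument n only shifts i),
-- so only the characters are threaded; 'continue' = skip the character.
def pvFmtAux (n : Int) : List Char → Int → List Char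
  | [], _ => []
  | c :: cs, counter =>
      if counter = n then pvFmtAux n cs 0
      else c :: pvFmtAux n cs (counter + 1)

-- The while loop, with fuel: for n ≥ 1 it tests its guard at most len(line)+1 times (end grows
-- by n ≥ 1 each step), so the fuel passed below never runs out; for n ≤ 0 the Python loop never
-- terminates (excluded by Pre_).  data.set index.toNat is Python's line_data[index] = c: index
-- starts at 0 and only ever grows by 1 (never negative), and an out-of-range index (Python
-- IndexError) is excluded by Pre_.  Python's test c != '' is dropped: a character of a string is
-- never the empty string.
def pvLoopA (fmt : List Char) (n : Int) : Nat → List String → Int → Int → Int → List String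
  | 0, data, _, _, _ => data
  | fuel + 1, data, index, start, stop =>
      if stop ≤ (fmt.length : Int) then
        pvLoopA fmt n fuel
          ((PySem.List.slice fmt (some start) (some stop)).foldl
            (fun d c => if c ≠ '[' ∧ c ≠ ']' ∧ c ≠ ' ' then d.set index.toNat (String.ofList [c]) else d)
            data)
          (index + 1) stop (stop + n)
      else data

def parse_line (line : String) (n : Int) : List String :=
  let fmt := pvFmtAux n line.toList 0
  pvLoopA fmt n (line.toList.length + 1) (List.replicate n.toNat "#") 0 0 n

-- ===== PORT B =====
def parse_line_alt (line : String) (n : Int) : List String :=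
  let cs := line.toList
  let kept : Int := (cs.length : Int) - PySem.Int.floordiv (cs.length : Int) (n + 1)
  (PySem.List.pyRange 0 (PySem.Int.floordiv kept n) 1).foldl
    (fun d k =>
      (PySem.List.pyRange (k * n) ((k + 1) * n) 1).foldl
        (fun d j =>
          let c := PySem.List.pyGetD cs (j + PySem.Int.floordiv j n) '?'
          if c ≠ '[' ∧ c ≠ ']' ∧ c ≠ ' ' then d.set k.toNat (String.ofList [c]) else d)
        d)
    (List.replicate n.toNat "#")

-- ===== PRECONDITION & SPEC =====
-- Pre_ excludes exactly the inputs on which the Python A does not return: n ≤ 0 (the while loop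
-- never terminates, or IndexError on the empty line_data), and, for n ≥ 1, lines where a crate
-- character (not '[', ']', ' ') falls — after the skip pattern (every (n+1)-th char dropped) —
-- into a complete group with group index ≥ n, where line_data[index] = c raises IndexError.
def Pre_parse_line (line : String) (n : Int) : Prop :=
  1 ≤ n ∧
  ∀ i : Nat, i < line.toList.length →
    (i % (n.toNat + 1) ≠ n.toNat ∧
     line.toList.getD i ' ' ≠ '[' ∧ line.toList.getD i ' ' ≠ ']' ∧ line.toList.getD i ' ' ≠ ' ') →
    (i - i / (n.toNat + 1)) / n.toNat < n.toNat ∨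
    (line.toList.length - line.toList.length / (n.toNat + 1)) / n.toNat ≤ (i - i / (n.toNat + 1)) / n.toNat
instance (line : String) (n : Int) : Decidable (Pre_parse_line line n) := by
  unfold Pre_parse_line; infer_instance

def pvWitness_parse_line : String × Int := ("[A] [B] [C]", 3)

def Spec_parse_line (line : String) (n : Int) (out : List String) : Prop := out = parse_line_alt line n
instance (line : String) (n : Int) (out : List String) : Decidable (Spec_parse_line line n out) := by
  unfold Spec_parse_line; infer_instance

-- ===== CLAIM (what is proved, stated in full; the proofs are below) =====
def Claim_equal_parse_line : Prop := ∀ (line : String) (n : Int), Dom_parse_line line n → Pre_parse_line line n → Spec_parse_line line n (parse_line line n)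

-- ===== LEMMAS AND PROOFS =====

-- the per-character update both loops perform on group k
def pvStep (k : Nat) (d : List String) (c : Char) : List String :=
  if c ≠ '[' ∧ c ≠ ']' ∧ c ≠ ' ' then d.set k (String.ofList [c]) else d

-- fmt_line with counter c ≤ N keeps the next N - c chars, skips one, restarts with counter 0
theorem pvFmtAux_chunk (N : Nat) :
    ∀ (cs : List Char) (c : Nat), c ≤ N →
      pvFmtAux (N : Int) cs (c : Int)
        = cs.take (N - c) ++ pvFmtAux (N : Int) (cs.drop (N - c + 1)) 0 := by
  intro cs
  induction cs with
  | nil => intro c hc; simp [pvFmtAux]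
  | cons a cs ih =>
    intro c hc
    rcases eq_or_lt_of_le hc with h | h
    · subst h
      simp [pvFmtAux]
    · have hne : ((c : Nat) : Int) ≠ (N : Int) := by exact_mod_cast Nat.ne_of_lt h
      have hstep : pvFmtAux (N : Int) (a :: cs) (c : Int) = a :: pvFmtAux (N : Int) cs ((c : Int) + 1) := by
        simp only [pvFmtAux, if_neg hne]
      have hc1 : ((c : Int) + 1) = ((c + 1 : Nat) : Int) := by push_cast; ring
      have h1 : N - c = (N - (c + 1)) + 1 := by omega
      rw [hstep, hc1, ih (c + 1) h, h1, List.take_succ_cons, List.drop_succ_cons]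
      simp

theorem pvFmtAux_length (N : Nat) (hN : 1 ≤ N) (cs : List Char) :
    (pvFmtAux (N : Int) cs 0).length = cs.length - cs.length / (N + 1) := by
  suffices h : ∀ (m : Nat) (cs : List Char), cs.length ≤ m →
      (pvFmtAux (N : Int) cs 0).length = cs.length - cs.length / (N + 1) from
    h cs.length cs le_rfl
  intro m
  induction m with
  | zero =>
    intro cs hcs
    have : cs = [] := List.eq_nil_of_length_eq_zero (by omega)
    subst this
    simp [pvFmtAux]
  | succ m ih =>
    intro cs hcs
    have hch := pvFmtAux_chunk N cs 0 (Nat.zero_le N)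
    simp only [Nat.sub_zero, Nat.cast_zero] at hch
    rw [hch, List.length_append, List.length_take]
    by_cases h : cs.length ≤ N
    · have hd : cs.drop (N + 1) = [] := List.drop_eq_nil_of_le (by omega)
      have hz : cs.length / (N + 1) = 0 := Nat.div_eq_of_lt (by omega)
      rw [hd, hz]
      simp [pvFmtAux]
      omega
    · have hdl : (cs.drop (N + 1)).length = cs.length - (N + 1) := List.length_drop
      have ihd := ih (cs.drop (N + 1)) (by rw [hdl]; omega)
      rw [hdl] at ihd
      rw [ihd]
      have hq := Nat.add_div_right (cs.length - (N + 1)) (Nat.succ_pos N)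
      have he : cs.length - (N + 1) + (N + 1) = cs.length := by omega
      rw [he] at hq
      have h2 : (cs.length - (N + 1)) / (N + 1) ≤ cs.length - (N + 1) := Nat.div_le_self _ _
      have key : ∀ (L q1 q2 : Nat), q2 = q1 + 1 → q1 ≤ L - (N + 1) → ¬ L ≤ N →
          min N L + (L - (N + 1) - q1) = L - q2 := by
        intro L q1 q2 e1 e2 e3
        omega
      exact key cs.length _ _ hq h2 h

theorem pvFmtAux_getElem? (N : Nat) (hN : 1 ≤ N) (cs : List Char) (j : Nat)
    (hj : j < (pvFmtAux (N : Int) cs 0).length) :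
    (pvFmtAux (N : Int) cs 0)[j]? = cs[j + j / N]? := by
  suffices h : ∀ (m : Nat) (cs : List Char) (j : Nat), cs.length ≤ m →
      j < (pvFmtAux (N : Int) cs 0).length →
      (pvFmtAux (N : Int) cs 0)[j]? = cs[j + j / N]? from h cs.length cs j le_rfl hj
  intro m
  induction m with
  | zero =>
    intro cs j h1 h2
    have : cs = [] := List.eq_nil_of_length_eq_zero (by omega)
    subst this
    simp [pvFmtAux] at h2
  | succ m ih =>
    intro cs j hcs hj
    have hlen := pvFmtAux_length N hN cs
    have hch := pvFmtAux_chunk N cs 0 (Nat.zero_le N)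
    simp only [Nat.sub_zero, Nat.cast_zero] at hch
    have hjm : j < cs.length := lt_of_lt_of_le (hlen ▸ hj) (Nat.sub_le _ _)
    by_cases hjN : j < N
    · have hdiv : j / N = 0 := Nat.div_eq_of_lt hjN
      have hlt : j < (cs.take N).length := by
        rw [List.length_take]
        exact lt_min hjN hjm
      rw [hch, List.getElem?_append_left hlt, List.getElem?_take, if_pos hjN, hdiv]
      simp
    · have hjN' : N ≤ j := Nat.le_of_not_lt hjN
      have htl : (cs.take N).length = N := by
        rw [List.length_take]
        exact min_eq_left (by omega)
      have hlen2 : (pvFmtAux (N : Int) cs 0).length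
          = (cs.take N).length + (pvFmtAux (N : Int) (cs.drop (N + 1)) 0).length := by
        rw [hch, List.length_append]
      rw [hch, List.getElem?_append_right (by rw [htl]; exact hjN'), htl]
      rw [htl] at hlen2
      have hrec := ih (cs.drop (N + 1)) (j - N) (by rw [List.length_drop]; omega)
        (by omega)
      rw [hrec, List.getElem?_drop]
      congr 1
      have hdd : j / N = (j - N) / N + 1 := Nat.div_eq_sub_div (by omega) hjN'
      obtain ⟨q, hq⟩ : ∃ q, (j - N) / N = q := ⟨_, rfl⟩
      rw [hq] at hdd
      rw [hq, hdd]
      omega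

theorem pvLoopA_eq (N : Nat) (hN : 1 ≤ N) (fmt : List Char) :
    ∀ (fuel k : Nat) (data : List String), fmt.length / N ≤ k + fuel →
      pvLoopA fmt (N : Int) fuel data (k : Int) ((k * N : Nat) : Int) (((k + 1) * N : Nat) : Int)
        = (List.range' k (fmt.length / N - k)).foldl
            (fun d k' => ((fmt.drop (k' * N)).take N).foldl (pvStep k') d) data := by
  intro fuel
  induction fuel with
  | zero =>
    intro k data h
    have h0 : fmt.length / N - k = 0 := by omega
    simp [pvLoopA, h0]
  | succ fuel ih =>
    intro k data h
    by_cases hk : k < fmt.length / N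
    · have hle : (k + 1) * N ≤ fmt.length := (Nat.le_div_iff_mul_le (by omega)).mp hk
      have hslice : PySem.List.slice fmt (some ((k * N : Nat) : Int)) (some (((k + 1) * N : Nat) : Int))
          = List.take N (List.drop (k * N) fmt) := by
        rw [PySem.List.slice_natCast]
        congr 1
        have h5 : (k + 1) * N = k * N + N := by ring
        omega
      have hbody : (fun (d : List String) (c : Char) =>
            if c ≠ '[' ∧ c ≠ ']' ∧ c ≠ ' ' then d.set ((k : Int)).toNat (String.ofList [c]) else d)
          = pvStep k := by
        funext d c
        simp [pvStep]
      have harg1 : ((k : Int) + 1) = ((k + 1 : Nat) : Int) := by push_cast; ring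
      have harg2 : (((k + 1) * N : Nat) : Int) + (N : Int) = (((k + 1 + 1) * N : Nat) : Int) := by
        push_cast; ring
      simp only [pvLoopA]
      rw [if_pos (show (((k + 1) * N : Nat) : Int) ≤ (fmt.length : Int) by exact_mod_cast hle)]
      rw [hslice, hbody, harg1, harg2]
      rw [ih (k + 1) _ (by omega)]
      rw [show fmt.length / N - k = (fmt.length / N - (k + 1)) + 1 from by omega, List.range'_succ]
      simp only [List.foldl_cons]
    · have hnat : ¬ ((k + 1) * N ≤ fmt.length) := by
        intro hc
        have := (Nat.le_div_iff_mul_le (show 0 < N by omega)).mpr hc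
        omega
      have hgt : ¬ ((((k + 1) * N : Nat) : Int) ≤ (fmt.length : Int)) := by exact_mod_cast hnat
      have h0 : fmt.length / N - k = 0 := by omega
      simp only [pvLoopA]
      rw [if_neg hgt, h0]
      simp

theorem foldl_range_getD {α β : Type} (l : List α) (n : Nat) (h : l.length = n)
    (f : β → α → β) (dflt : α) (d0 : β) :
    (List.range n).foldl (fun d t => f d (l.getD t dflt)) d0 = l.foldl f d0 := by
  subst h
  induction l generalizing d0 with
  | nil => simp
  | cons a l ih =>
    rw [List.length_cons, List.range_succ_eq_map]
    simp only [List.foldl_cons, List.foldl_map, List.getD_cons_zero, List.getD_cons_succ]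
    exact ih (f d0 a)

theorem pvInner (N : Nat) (hN : 1 ≤ N) (cs : List Char) (k : Nat)
    (hk : k < (pvFmtAux (N : Int) cs 0).length / N) (acc : List String) :
    (PySem.List.pyRange ((k : Int) * (N : Int)) (((k : Int) + 1) * (N : Int)) 1).foldl
      (fun d j =>
        let c := PySem.List.pyGetD cs (j + PySem.Int.floordiv j (N : Int)) '?'
        if c ≠ '[' ∧ c ≠ ']' ∧ c ≠ ' ' then d.set ((k : Int)).toNat (String.ofList [c]) else d)
      acc
    = (((pvFmtAux (N : Int) cs 0).drop (k * N)).take N).foldl (pvStep k) acc := by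
  have hkk : (k + 1) * N ≤ (pvFmtAux (N : Int) cs 0).length :=
    (Nat.le_div_iff_mul_le (by omega)).mp hk
  have hL : (pvFmtAux (N : Int) cs 0).length ≤ cs.length := by
    rw [pvFmtAux_length N hN cs]
    exact Nat.sub_le _ _
  have hgp : (((pvFmtAux (N : Int) cs 0).drop (k * N)).take N).length = N := by
    rw [List.length_take, List.length_drop]
    have h5 : (k + 1) * N = k * N + N := by ring
    omega
  have hcast1 : ((k : Int)) * (N : Int) = ((k * N : Nat) : Int) := by push_cast; ring
  have hcast2 : (((k : Int)) + 1) * (N : Int) = (((k + 1) * N : Nat) : Int) := by push_cast; ring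
  have hsum : ((((k + 1) * N : Nat) : Int) - ((k * N : Nat) : Int)).toNat = N := by
    have h5 : (k + 1) * N = k * N + N := by ring
    rw [h5]
    push_cast
    simp
  rw [hcast1, hcast2, PySem.List.pyRange_one, hsum, List.foldl_map]
  refine (PySem.List.foldl_congr_mem (List.range N) _ _ acc ?_).trans
    (foldl_range_getD _ N hgp (pvStep k) '?' acc)
  intro acc' t ht
  have htN : t < N := List.mem_range.mp ht
  have hj : k * N + t < (pvFmtAux (N : Int) cs 0).length := by
    have h5 : (k + 1) * N = k * N + N := by ring
    omega
  have hchar : PySem.List.pyGetD cs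
        ((((k * N : Nat)) : Int) + (t : Int)
          + PySem.Int.floordiv ((((k * N : Nat)) : Int) + (t : Int)) (N : Int)) '?'
      = (((pvFmtAux (N : Int) cs 0).drop (k * N)).take N).getD t '?' := by
    have hc7 : (((k * N : Nat)) : Int) + (t : Int) = ((k * N + t : Nat) : Int) := by push_cast; ring
    rw [hc7, PySem.Int.floordiv_natCast]
    rw [show ((k * N + t : Nat) : Int) + (((k * N + t) / N : Nat) : Int)
          = (((k * N + t) + (k * N + t) / N : Nat) : Int) from by push_cast; ring]
    rw [PySem.List.pyGetD_natCast]
    have hfm := pvFmtAux_getElem? N hN cs (k * N + t) hj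
    rw [List.getD_eq_getElem?_getD, List.getD_eq_getElem?_getD]
    rw [List.getElem?_take, if_pos htN, List.getElem?_drop, hfm]
  simp only [Int.toNat_natCast, hchar, pvStep]

theorem parse_line_spec' (line : String) (N : Nat) (hN : 1 ≤ N) :
    parse_line line ((N : Nat) : Int) = parse_line_alt line ((N : Nat) : Int) := by
  have hLlen := pvFmtAux_length N hN line.toList
  have hfuel : (pvFmtAux (N : Int) line.toList 0).length / N ≤ 0 + (line.toList.length + 1) :=
    le_trans (Nat.div_le_self _ _)
      (by rw [hLlen]; exact le_trans (Nat.sub_le _ _) (by omega))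
  have hA := pvLoopA_eq N hN (pvFmtAux (N : Int) line.toList 0) (line.toList.length + 1) 0
    (List.replicate N "#") hfuel
  simp only [Nat.zero_mul, Nat.zero_add, Nat.one_mul, Nat.cast_zero, Nat.sub_zero] at hA
  rw [show parse_line line ((N : Nat) : Int)
        = pvLoopA (pvFmtAux (N : Int) line.toList 0) (N : Int) (line.toList.length + 1)
            (List.replicate N "#") 0 0 (N : Int) from by
      simp only [parse_line, Int.toNat_natCast]]
  rw [hA]
  simp only [parse_line_alt, Int.toNat_natCast]
  have hc0 : ((N : Int) + 1) = ((N + 1 : Nat) : Int) := by push_cast; ring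
  rw [hc0, PySem.Int.floordiv_natCast]
  rw [show ((line.toList.length : Nat) : Int) - ((line.toList.length / (N + 1) : Nat) : Int)
        = ((line.toList.length - line.toList.length / (N + 1) : Nat) : Int) from
      (Nat.cast_sub (Nat.div_le_self line.toList.length (N + 1))).symm]
  rw [PySem.Int.floordiv_natCast, ← hLlen]
  have hrange : PySem.List.pyRange 0 (((pvFmtAux (N : Int) line.toList 0).length / N : Nat) : Int) 1
      = (List.range ((pvFmtAux (N : Int) line.toList 0).length / N)).map (fun t => ((t : Nat) : Int)) := by
    rw [PySem.List.pyRange_one]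
    rw [show ((((pvFmtAux (N : Int) line.toList 0).length / N : Nat) : Int) - 0).toNat
          = (pvFmtAux (N : Int) line.toList 0).length / N from by
        rw [Int.sub_zero, Int.toNat_natCast]]
    simp
  rw [hrange, List.foldl_map, List.range_eq_range']
  refine PySem.List.foldl_congr_mem _ _ _ _ ?_
  intro acc k hkmem
  have hk : k < (pvFmtAux (N : Int) line.toList 0).length / N := by
    have := (List.mem_range'_1.mp hkmem).2
    omega
  exact (pvInner N hN line.toList k hk acc).symm

-- ===== VERDICT (by name: the statement is the Claim_ definition above) =====
theorem parse_line_spec : Claim_equal_parse_line := by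
  intro line n _ hPre
  have hn : 1 ≤ n := hPre.1
  have h := parse_line_spec' line n.toNat (by omega)
  rw [Int.toNat_of_nonneg (by omega)] at h
  exact h
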